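/- GENERATED by farm/worked/mk_tree_copies.py from farm/worked/getn/Proof.lean (a worked proof of the farm's unit `getn`,
   accepted by the verdict) — do not edit. -/
import Asan.CheckWalk
import Vorbis.Spec.ReaderLemmas
import Vorbis.Spec.Units.getn

open X86 X86.User Asan Vorbis Vorbis.Spec

set_option maxRecDepth 4000
set_option maxHeartbeats 16000000


/-- `getn(f, data, n)` satisfies its contract: three checked loads and one checked store through `f`, the signed length test of
FIX 20, one call of `memcpy` (its contract is used with the argument registers of the call carried to its postcondition:
`calls_keep`), and the store of `stream + n`. -/
theorem Vorbis.Spec.Worked.getn_ok : Vorbis.Spec.getn.Statement := by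
  intro Lay hLay μ hμ u₀ hcode hload8 hstore4 h_memcpy others frames Blk len u ret he hpre
  v_entry he
  have hsp := hpre.reader.shadow.rsp
  have hwhere := hpre.reader.where_obj
  -- `f`, the object's address as a number
  obtain ⟨f, hf⟩ : ∃ f : Nat, (u.reg .rdi).toNat = f := ⟨_, rfl⟩
  have hr : u.reg .rdi = addr f := eq_addr _ _ hf
  have hbits : Bits Blk len u.mem f := hf ▸ hpre.reader.bits
  have hL : BlkLive Blk (Live (stackObjs frames ++ others)) := hpre.reader.env.live
  have hp := hbits.ptr_range
  have hobr := hbits.OBR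
  simp only [voff] at hobr
  -- `n`, the count, as a natural number
  have hn0 := hpre.nonneg
  obtain ⟨N, hN⟩ : ∃ N : Nat, argInt (u.reg .rdx) = (N : Int) := ⟨(argInt (u.reg .rdx)).toNat, by omega⟩
  have hNt : (argInt (u.reg .rdx)).toNat = N := by omega
  have esx : Word.ofBV (BitVec.signExtend 64 (Word.part Width.w32 (u.reg .rdx))) = addr N := by
    rw [Vorbis.Spec.ByteReader.sx32_eq_word, word_nonneg _ hn0, hNt]
  have esi : (BitVec.signExtend 64 (Word.part Width.w32 (u.reg .rdx))).toInt = (N : Int) := by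
    rw [Vorbis.Spec.ByteReader.sx32_toInt, hN]
  have esub : (UInt64.ofNat (stb_vorbis.stream_end u.mem f) - UInt64.ofNat (stb_vorbis.stream u.mem f)).toBitVec.toInt =
      (stb_vorbis.stream_end u.mem f : Int) - (stb_vorbis.stream u.mem f : Int) :=
    Vorbis.Spec.ByteReader.sub_toInt _ _ (by omega) (by omega)
  -- memcpy's contract, with the argument registers of the call carried to its postcondition
  have hmemcpy := Vorbis.Spec.ByteReader.calls_keep (h_memcpy others frames)
    (fun v => (v.reg .rsp).toNat = (u.reg .rsp).toNat - 48 ∧ (v.reg .rdi).toNat = (u.reg .rsi).toNat ∧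
      (v.reg .rsi).toNat = stb_vorbis.stream u.mem f ∧ (v.reg .rdx).toNat = N)
  -- the two loads of the function, named
  have r48 : u.mem.readLE (addr f + 48) 8 = stb_vorbis.stream u.mem f := by
    simp only [vfield, vacc, voff]
  have r64 : u.mem.readLE (addr f + 64) 8 = stb_vorbis.stream_end u.mem f := by
    simp only [vfield, vacc, voff]
  u_walk hcode [hμ.vendor] until [Vorbis.L.getn.cut1] span [Vorbis.L.textLo, Vorbis.L.textHi] side (v_side)
  · -- 0x107f17, load8 [f + 64] (`z->stream_end`): a field of `*f`
    have hun : ShadowUntouched u.mem s_107f17.mem := by v_untouched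
    have hs := hbits.site_field hL 64 8 (by omega) (by omega) rfl
    exact Vorbis.Spec.check_site hpre.reader.shadow.inv hun hs (by u_omega)
  · -- 0x107f24, load8 [f + 48] (`z->stream`): a field of `*f`
    have hun : ShadowUntouched u.mem s_107f24.mem := by v_untouched
    have hs := hbits.site_field hL 48 8 (by omega) (by omega) rfl
    exact Vorbis.Spec.check_site hpre.reader.shadow.inv hun hs (by u_omega)
  · -- the callee's invariant
    show X86.User.abiInv _
    refine Vorbis.abiInv_of ?_ ?_
    · rw [w_flags, X86.User.df_setStatus]
      exact w_df_107f24
    · rw [w_mxcsr]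
      exact he_mx
  · -- 0x107f62, memcpy's precondition
    rw [esi, esub] at hbr_107f33
    have hun : ShadowUntouched u.mem s_107f62.mem := by v_untouched
    have hsh : ShadowPre others frames s_107f62 :=
      hpre.reader.shadow.call hun (by u_omega) (by u_omega) (by u_omega)
    have hrdi : (s_107f62.reg .rdi).toNat = (u.reg .rsi).toNat := by
      rw [w_rdi]
    have hrsi : (s_107f62.reg .rsi).toNat = stb_vorbis.stream u.mem f := by
      rw [w_rsi]
      exact toNat_addr _ (by omega)
    have hrdx : (s_107f62.reg .rdx).toNat = N := by
      rw [w_rdx, esx]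
      exact toNat_addr _ (by omega)
    refine ⟨⟨hsh, ?_⟩, ?_, hrdi, hrsi, hrdx⟩
    rotate_left
    · rw [w_rsp]
      u_omega
    by_cases h0 : N = 0
    · left
      rw [hrdx]
      exact h0
    · right
      have hS1 := hbits.S1
      simp only [voff] at hS1
      have hlen : 0 < len := by omega
      have hin := hpre.reader.env.inp hlen
      have hap := hpre.apart.offInput
      rw [hNt] at hap
      simp only [voff] at hap hin
      rw [hrdx, hrsi, hrdi]
      refine ⟨?_, ?_, ?_⟩
      · exact hin.sub _ _ (by omega) (by omega)
      · have hd := hpre.dest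
        rw [hNt] at hd
        exact hd.resolve_left h0
      · omega
  · -- 0x107f3c, store4 [f + 136] (`z->eof`): a field of `*f`
    have hun : ShadowUntouched u.mem s_107f3c.mem := by v_untouched
    have hs := hbits.site_field hL 136 4 (by omega) (by omega) rfl
    exact Vorbis.Spec.check_site hpre.reader.shadow.inv hun hs (by u_omega)
  · -- after memcpy (0x107f67): `z->stream += n; return 1`
    rw [esi, esub] at hbr_107f33
    obtain ⟨hpost, hrsp, hrdi, hrsi, hrdx⟩ := w_post
    obtain ⟨_, hunm, hcopy⟩ := hpost
    -- memcpy's footprint, in the caller's terms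
    have hsame : Mem.SameExcept
        [⟨(u.reg .rsp).toNat - 48 - 80, (u.reg .rsp).toNat - 48⟩, ⟨(u.reg .rsi).toNat, (u.reg .rsi).toNat + N⟩]
        s_107f62.mem s_107f62r.mem := by
      have h := w_same
      simp only [X86.User.Spec.footprint, vspec, hrsp, hrdi, hrdx] at h
      exact h
    clear w_same
    -- the function's footprint so far
    have hs1 : Mem.SameExcept
        [⟨(u.reg .rsp).toNat - 128, (u.reg .rsp).toNat⟩,
         ⟨(u.reg .rsi).toNat, (u.reg .rsi).toNat + (argInt (u.reg .rdx)).toNat⟩,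
         ⟨(u.reg .rdi).toNat + 48, (u.reg .rdi).toNat + 56⟩, ⟨(u.reg .rdi).toNat + 136, (u.reg .rdi).toNat + 140⟩]
        u.mem s_107f62.mem := by
      u_same
    have hs2 := hs1.step_same hsame (by
      intro w hw a h1 h2
      simp only [List.mem_cons, List.mem_nil_iff, or_false] at hw
      rcases hw with rfl | rfl
      · refine ⟨⟨(u.reg .rsp).toNat - 128, (u.reg .rsp).toNat⟩, ?_, ?_, ?_⟩
        · simp only [List.mem_cons, true_or]
        · show (u.reg .rsp).toNat - 128 ≤ a
          have : (u.reg .rsp).toNat - 48 - 80 ≤ a := h1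
          omega
        · show a < (u.reg .rsp).toNat
          have : a < (u.reg .rsp).toNat - 48 := h2
          omega
      · refine ⟨⟨(u.reg .rsi).toNat, (u.reg .rsi).toNat + (argInt (u.reg .rdx)).toNat⟩, ?_, ?_, ?_⟩
        · simp only [List.mem_cons, true_or, or_true]
        · exact h1
        · rw [hNt]
          exact h2)
    clear hs1
    -- where the destination is; for `n = 0` nothing was copied and nothing is known of `data`: an empty window elsewhere
    have hd := hpre.dest
    have hap := hpre.apart
    rw [hNt] at hd
    rw [hf, hNt] at hap
    have hapI := hap.offInput
    have hapF := hap.offFields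
    simp only [voff] at hapI
    obtain ⟨dlo, dhi, hsame', hd1, hd2, hd3, hd4, hd5⟩ : ∃ dlo dhi : Nat,
        Mem.SameExcept [⟨(u.reg .rsp).toNat - 48 - 80, (u.reg .rsp).toNat - 48⟩, ⟨dlo, dhi⟩] s_107f62.mem s_107f62r.mem ∧
        0x119d40 ≤ dlo ∧ dhi ≤ 0xC00000 ∧
        ((u.reg .rsp).toNat + 8 ≤ dlo ∨ dhi ≤ 0x700000 ∨ 0x800000 ≤ dlo) ∧
        (0x200000 + len ≤ dlo ∨ dhi ≤ 0x200000) ∧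
        (dhi ≤ f ∨ f + 1808 ≤ dlo ∨ (f + 1492 ≤ dlo ∧ dhi ≤ f + 1747)) := by
      by_cases h0 : N = 0
      · refine ⟨0x119d40, 0x119d40, ?_, by omega, by omega, by omega, by omega, by omega⟩
        apply hsame.mono
        intro w hw a h1 h2
        simp only [List.mem_cons, List.mem_nil_iff, or_false] at hw
        rcases hw with rfl | rfl
        · exact ⟨_, List.mem_cons_self, h1, h2⟩
        · exfalso
          have h1' : (u.reg .rsi).toNat ≤ a := h1
          have h2' : a < (u.reg .rsi).toNat + N := h2
          omega
      · have hw := (hd.resolve_left h0).where_ hpre.reader.shadow.inv hpre.reader.shadow.offText (by omega)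
        exact ⟨_, _, hsame, hw.1, hw.2.1, hw.2.2, hapI, hapF⟩
    rw [w_mem_107f62] at hsame'
    clear hsame
    -- `z->stream` after the copy
    have r48' : s_107f62r.mem.readLE (addr f + 48) 8 = stb_vorbis.stream u.mem f := by
      u_frame r48
    -- the saved registers and the return address are still in their slots: memcpy's stack is below them, `data` is off them
    have hoff : ∀ a : Word, (u.reg .rsp).toNat - 40 ≤ a.toNat → a.toNat ≤ (u.reg .rsp).toNat →
        ∀ w ∈ [(⟨(u.reg .rsp).toNat - 48 - 80, (u.reg .rsp).toNat - 48⟩ : Span), ⟨dlo, dhi⟩],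
          a.toNat + 8 ≤ w.lo ∨ w.hi ≤ a.toNat := by
      intro a h1 h2 w hw
      simp only [List.mem_cons, List.mem_nil_iff, or_false] at hw
      rcases hw with rfl | rfl
      · right
        show (u.reg .rsp).toNat - 48 ≤ a.toNat
        omega
      · show a.toNat + 8 ≤ dlo ∨ dhi ≤ a.toNat
        omega
    have k_r14 : UInt64.ofNat (s_107f62r.mem.readLE (u.reg .rsp - 8) 8) = u.reg .r14 := by
      rw [hsame'.readLE (u.reg .rsp - 8) 8 (by u_omega) (hoff _ (by u_omega) (by u_omega))]
      refine (congrArg UInt64.ofNat (?_ : _ = (u.reg .r14).toNat)).trans UInt64.ofNat_toNat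
      u_read
    have k_r13 : UInt64.ofNat (s_107f62r.mem.readLE (u.reg .rsp - 16) 8) = u.reg .r13 := by
      rw [hsame'.readLE (u.reg .rsp - 16) 8 (by u_omega) (hoff _ (by u_omega) (by u_omega))]
      refine (congrArg UInt64.ofNat (?_ : _ = (u.reg .r13).toNat)).trans UInt64.ofNat_toNat
      u_read
    have k_r12 : UInt64.ofNat (s_107f62r.mem.readLE (u.reg .rsp - 24) 8) = u.reg .r12 := by
      rw [hsame'.readLE (u.reg .rsp - 24) 8 (by u_omega) (hoff _ (by u_omega) (by u_omega))]
      refine (congrArg UInt64.ofNat (?_ : _ = (u.reg .r12).toNat)).trans UInt64.ofNat_toNat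
      u_read
    have k_rbp : UInt64.ofNat (s_107f62r.mem.readLE (u.reg .rsp - 32) 8) = u.reg .rbp := by
      rw [hsame'.readLE (u.reg .rsp - 32) 8 (by u_omega) (hoff _ (by u_omega) (by u_omega))]
      refine (congrArg UInt64.ofNat (?_ : _ = (u.reg .rbp).toNat)).trans UInt64.ofNat_toNat
      u_read
    have k_rbx : UInt64.ofNat (s_107f62r.mem.readLE (u.reg .rsp - 40) 8) = u.reg .rbx := by
      rw [hsame'.readLE (u.reg .rsp - 40) 8 (by u_omega) (hoff _ (by u_omega) (by u_omega))]
      refine (congrArg UInt64.ofNat (?_ : _ = (u.reg .rbx).toNat)).trans UInt64.ofNat_toNat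
      u_read
    have k_ret : UInt64.ofNat (s_107f62r.mem.readLE (u.reg .rsp) 8) = ret := by
      u_frame he_retAddr
    -- the image's text at the returned state
    have w_eq : Mem.EqOn Vorbis.L.textLo Vorbis.L.textHi u₀.mem s_107f62r.mem := Vorbis.conv_code_eqOn w_code
    have hinv : X86.User.abiInv s_107f62r := w_inv
    u_walk hcode [hμ.vendor] span [Vorbis.L.textLo, Vorbis.L.textHi] side (v_side)
    · -- 0x107f6b, load8 [f + 48] (`z->stream`, for the `add`): a field of `*f`; memcpy wrote no shadow byte
      have hun : ShadowUntouched u.mem s_107f6b.mem := by v_untouched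
      have hs := hbits.site_field hL 48 8 (by omega) (by omega) rfl
      exact Vorbis.Spec.check_site hpre.reader.shadow.inv hun hs (by u_omega)
    · -- the state after the `ret`
      have hfit : stb_vorbis.stream u.mem f + N ≤ stb_vorbis.stream_end u.mem f := by omega
      refine ReachVia.done ?_
      refine X86.User.Returned.mk w_rip w_rsp ?_ ?_ (Vorbis.conv_code_in w_eq) ?_ ?_
      · u_saved
      · simp only [X86.User.Spec.footprint, vspec]
        u_same
      · show X86.User.abiInv _
        refine Vorbis.abiInv_of ?_ ?_
        · rw [w_flags, X86.User.df_setStatus, w_df_107f6b]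
          exact hinv.1
        · rw [w_mxcsr]
          exact hinv.2
      show Vorbis.Spec.GetnPost Blk len (u.reg .rdi).toNat (u.reg .rsi).toNat (argInt (u.reg .rdx)) u s_107f58
      rw [hf, hN]
      have hNN : ((N : Int)).toNat = N := by omega
      -- the value stored: `stream + n`
      have hN31 : N < 2 ^ 31 := by
        have hc := sint32_cases ((u.reg .rdx).toNat % 2 ^ 32)
        have hlt : (u.reg .rdx).toNat % 2 ^ 32 < 2 ^ 32 := Nat.mod_lt _ (by decide)
        rw [argInt_def] at hN
        omega
      have hsxn : (BitVec.signExtend 64 (Word.part Width.w32 (u.reg .rdx))).toNat = N := by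
        have h := esi
        rw [BitVec.toInt_eq_toNat_cond] at h
        have hlt := (BitVec.signExtend 64 (Word.part Width.w32 (u.reg .rdx))).isLt
        split at h <;> omega
      have esv : (BitVec.ofNat 64 (stb_vorbis.stream u.mem f) +
          BitVec.signExtend 64 (Word.part Width.w32 (u.reg .rdx))).toNat = stb_vorbis.stream u.mem f + N := by
        rw [BitVec.toNat_add, BitVec.toNat_ofNat, hsxn]
        omega
      have es : stb_vorbis.stream s_107f58.mem f = stb_vorbis.stream u.mem f + N := by
        have e1 : s_107f58.mem.readLE (addr f + 48) 8 = (BitVec.ofNat 64 (stb_vorbis.stream u.mem f) +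
            BitVec.signExtend 64 (Word.part Width.w32 (u.reg .rdx))).toNat := by
          rw [w_mem]
          u_read
        simp only [vfield] at e1
        have e0 : stb_vorbis.stream s_107f58.mem f = s_107f58.mem.u64 (f + 48) := by
          simp only [vacc, voff]
        rw [e0, e1, esv]
      -- the fields `Bits` and μ read, besides `stream`: untouched (the destination is off them)
      have hE1 : Mem.EqOn (f + 56) (f + 72) u.mem s_107f58.mem := by
        u_memnorm
        u_eqon
      have hE2 : Mem.EqOn (f + 1488) (f + 1492) u.mem s_107f58.mem := by
        u_memnorm
        u_eqon
      have hE3 : Mem.EqOn (f + 1748) (f + 1756) u.mem s_107f58.mem := by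
        u_memnorm
        u_eqon
      have hE4 : Mem.EqOn (f + 1768) (f + 1772) u.mem s_107f58.mem := by
        u_memnorm
        u_eqon
      have hnew := Vorbis.Spec.ByteReader.bits_stream_moved hbits hE1 hE2 hE3 hE4 _ es (by omega) (by omega)
      have hmu := muOf_consumed (stb_vorbis.stream_end u.mem f) (stb_vorbis.stream u.mem f) (stb_vorbis.stream u.mem f + N) N
        (stb_vorbis.segment_count u.mem f) (stb_vorbis.next_seg u.mem f) (stb_vorbis.bytes_in_seg u.mem f)
        (by omega) (by omega)
      rw [← hnew.2, ← mu_def] at hmu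
      constructor
      · v_untouched
      · exact ⟨hnew.1, by omega⟩
      · right
        rw [w_rax]
        rfl
      · intro _
        rw [hNN]
        refine ⟨?_, es, ?_, hmu⟩
        · rw [w_rax]
          rfl
        · -- the bytes copied
          intro i hi
          have hw := (hd.resolve_left (by omega)).where_ hpre.reader.shadow.inv hpre.reader.shadow.offText (by omega)
          have ea : s_107f62.reg .rdi + UInt64.ofNat i = addr ((u.reg .rsi).toNat + i) := by
            rw [eq_addr _ _ hrdi]
            exact (UInt64.ofNat_add _ _).symm
          have eb : s_107f62.reg .rsi + UInt64.ofNat i = addr (stb_vorbis.stream u.mem f + i) := by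
            rw [eq_addr _ _ hrsi]
            exact (UInt64.ofNat_add _ _).symm
          have hc := hcopy i (by omega)
          rw [ea, eb, w_mem_107f62] at hc
          -- the source byte: the pushes did not touch the input
          have hsrc : u.mem.readLE (addr (stb_vorbis.stream u.mem f + i)) 1 =
              u.mem.readLE (addr (stb_vorbis.stream u.mem f + i)) 1 := rfl
          have hsrc' : s_107f62r.mem.readLE (addr ((u.reg .rsi).toNat + i)) 1 =
              u.mem.readLE (addr (stb_vorbis.stream u.mem f + i)) 1 := by
            refine hc.trans ?_
            u_frame hsrc
          -- the destination byte: the two stores after the copy did not touch it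
          show s_107f58.mem.readLE (addr ((u.reg .rsi).toNat + i)) 1 = u.mem.readLE (addr (stb_vorbis.stream u.mem f + i)) 1
          have ta : (addr f + 48).toNat = f + 48 := by u_omega
          have tb : (u.reg .rsp - 48).toNat = (u.reg .rsp).toNat - 48 := by u_omega
          have td : (addr ((u.reg .rsi).toNat + i)).toNat = (u.reg .rsi).toNat + i := toNat_addr _ (by omega)
          have hEd : Mem.EqOn ((u.reg .rsi).toNat + i) ((u.reg .rsi).toNat + i + 1) s_107f62r.mem s_107f58.mem := by
            rw [w_mem]
            refine Mem.EqOn.step_writeLE _ _ _ (Mem.EqOn.step_writeLE _ _ _ (Mem.EqOn.refl _ _ _) ?_ ?_) ?_ ?_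
            · rw [tb]
              omega
            · rw [tb]
              omega
            · rw [ta]
              omega
            · rw [ta]
              omega
          refine (hEd.readLE (addr ((u.reg .rsi).toNat + i)) 1 ?_ ?_ ?_).trans hsrc'
          · rw [td]
            exact Nat.le_refl _
          · rw [td]
            exact Nat.le_refl _
          · rw [td]
            omega
      · intro hshort
        omega
  · -- the path through `z->eof = 1; return 0`
    rw [esi, esub] at hbr_107f33
    refine ReachVia.done ?_
    refine X86.User.Returned.mk w_rip ?_ ?_ ?_ (Vorbis.conv_code_in w_eq) ?_ ?_
    · exact w_rsp
    · u_saved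
    · simp only [X86.User.Spec.footprint, vspec]
      u_same
    · show X86.User.abiInv _
      refine Vorbis.abiInv_of ?_ ?_
      · rw [w_flags]
        exact w_df_107f3c
      · rw [w_mxcsr]
        exact he_mx
    show Vorbis.Spec.GetnPost Blk len (u.reg .rdi).toNat (u.reg .rsi).toNat (argInt (u.reg .rdx)) u s_107f58
    rw [hf, hN]
    -- what the memory is now: the fields `Bits` and μ read are untouched, `eof` is 1
    have hE1 : Mem.EqOn (f + 48) (f + 72) u.mem s_107f58.mem := by
      u_memnorm
      u_eqon
    have hE2 : Mem.EqOn (f + 1488) (f + 1492) u.mem s_107f58.mem := by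
      u_memnorm
      u_eqon
    have hE3 : Mem.EqOn (f + 1748) (f + 1756) u.mem s_107f58.mem := by
      u_memnorm
      u_eqon
    have hE4 : Mem.EqOn (f + 1768) (f + 1772) u.mem s_107f58.mem := by
      u_memnorm
      u_eqon
    have hb' : Bits Blk len s_107f58.mem f :=
      hbits.frame_fields ⟨hE1, hE2, hE3.mono (by omega) (by omega), hE4⟩
    have hmu : mu s_107f58.mem f = mu u.mem f :=
      mu_frame (by omega) hE1 hE2 (hE3.mono (by omega) (by omega)) (hE3.mono (by omega) (by omega))
    have es : stb_vorbis.stream s_107f58.mem f = stb_vorbis.stream u.mem f := by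
      simp only [vacc, voff]
      exact hE1.u64 _ (by omega) (by omega) (by omega)
    have eeof : stb_vorbis.eof s_107f58.mem f = 1 := by
      have e1 : s_107f58.mem.readLE (addr f + 136) 4 = 1 := by
        rw [w_mem]
        u_read
      simp only [vfield] at e1
      simp only [vacc, voff, Mem.i32_def]
      rw [e1]
      rfl
    constructor
    · v_untouched
    · exact ⟨hb', by omega⟩
    · left
      rw [w_rax]
      rfl
    · intro hfit
      omega
    · intro _
      refine ⟨?_, es, eeof⟩
      rw [w_rax]
      rfl
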